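-- pv_equiv track=rewrite | github.com/Conviss/Experimental-review | Approximate Annulus Partition for Kernel Density Estimation/Approximate Annulus Partition for Kernel Density Estimation.py | build_distance_tables
-- ===== SOURCE A (Python) =====
-- from collections import defaultdict
--
-- def build_distance_tables(hash_tables):
--     distance_tables = []
--
--     for table in hash_tables:
--         distance_table = {}
--
--         for hash_value in table.keys():
--             # 计算与当前哈希值的所有可能汉明距离
--             distances = defaultdict(list)
--             for other_hash_value in table.keys():
--                 hamming_distance = sum(c1 != c2 for c1, c2 in zip(hash_value, other_hash_value))
--                 distances[hamming_distance].append(other_hash_value)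
--
--             distance_table[hash_value] = distances
--
--         distance_tables.append(distance_table)
--
--     return distance_tables
-- ===== SOURCE B (Python) =====
-- def build_distance_tables(hash_tables):
--     out = []
--     for table in hash_tables:
--         keys = list(table)
--         per = {}
--         for k in keys:
--             ds = [sum(a != b for a, b in zip(k, o)) for o in keys]
--             per[k] = {d: [o for o, dd in zip(keys, ds) if dd == d]
--                       for d in dict.fromkeys(ds)}
--         out.append(per)
--     return out
-- ===== Notes on version B (the rewrite author's own statement) =====
-- stated objective: alternative
-- what changed: B replaces A's incremental defaultdict-append loop by a declarative group-by: per key it precomputes the distance vector to all keys once, derives the bucket order with an ordered dedup (dict.fromkeys), and builds each bucket by filtering the zipped key/distance vector, with plain dict comprehensions instead of nested mutation loops.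
import Mathlib
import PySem

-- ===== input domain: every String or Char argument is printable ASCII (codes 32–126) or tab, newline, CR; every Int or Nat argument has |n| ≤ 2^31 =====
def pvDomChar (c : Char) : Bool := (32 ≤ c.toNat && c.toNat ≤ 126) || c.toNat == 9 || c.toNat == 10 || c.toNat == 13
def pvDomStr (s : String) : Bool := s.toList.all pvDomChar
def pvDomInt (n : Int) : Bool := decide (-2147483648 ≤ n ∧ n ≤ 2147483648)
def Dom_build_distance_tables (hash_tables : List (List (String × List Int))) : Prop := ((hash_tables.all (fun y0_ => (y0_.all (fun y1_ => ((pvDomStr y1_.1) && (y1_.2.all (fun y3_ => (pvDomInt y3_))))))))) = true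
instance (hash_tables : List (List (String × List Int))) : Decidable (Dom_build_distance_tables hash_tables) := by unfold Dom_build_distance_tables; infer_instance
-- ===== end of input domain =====

-- B replaces the incremental defaultdict-append loops by a declarative group-by: per key it
-- precomputes the distance vector once, gets the bucket order by ordered dedup and each bucket by
-- filtering the zipped key/distance vector; alternative decomposition, same asymptotic cost.

-- sum(c1 != c2 for c1, c2 in zip(a, b))
def pvHamming (a b : String) : Int :=
  ((a.toList.zip b.toList).map (fun p => if p.1 ≠ p.2 then (1:Int) else 0)).sum

-- ===== PORT A =====
def build_distance_tables (hash_tables : List (List (String × List Int))) : List (List (String × List (Int × List String))) :=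
  hash_tables.foldl (fun distance_tables table =>
    -- table.keys(): the dict's keys in insertion order (first occurrences)
    let keys := PySem.List.dedup (table.map Prod.fst)
    let distance_table : PySem.Dict String (PySem.Dict Int (List String)) :=
      keys.foldl (fun dt hash_value =>
        -- distances = defaultdict(list); distances[h].append(other)
        let distances :=
          keys.foldl (fun (d : PySem.Dict Int (List String)) other =>
            let h := pvHamming hash_value other
            d.insert h (d.getD h [] ++ [other])) PySem.Dict.empty
        dt.insert hash_value distances) PySem.Dict.empty
    distance_tables ++ [distance_table.items.map (fun p => (p.1, p.2.items))]) []

-- ===== PORT B =====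
def build_distance_tables_alt (hash_tables : List (List (String × List Int))) : List (List (String × List (Int × List String))) :=
  hash_tables.map (fun table =>
    let keys := PySem.List.dedup (table.map Prod.fst)
    keys.map (fun k =>
      -- ds = [sum(a != b for a, b in zip(k, o)) for o in keys]
      let ds := keys.map (fun o =>
        ((k.toList.zip o.toList).map (fun p => if p.1 ≠ p.2 then (1:Int) else 0)).sum)
      -- {d: [o for o, dd in zip(keys, ds) if dd == d] for d in dict.fromkeys(ds)}
      (k, (PySem.List.dedup ds).map (fun d =>
        (d, ((keys.zip ds).filter (fun p => p.2 == d)).map Prod.fst)))))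

-- ===== PRECONDITION & SPEC =====
def Spec_build_distance_tables (hash_tables : List (List (String × List Int))) (out : List (List (String × List (Int × List String)))) : Prop := out = build_distance_tables_alt hash_tables
instance (hash_tables : List (List (String × List Int))) (out : List (List (String × List (Int × List String)))) : Decidable (Spec_build_distance_tables hash_tables out) := by unfold Spec_build_distance_tables; infer_instance

-- ===== CLAIM =====
def Claim_equal_build_distance_tables : Prop := ∀ (hash_tables : List (List (String × List Int))), Dom_build_distance_tables hash_tables → Spec_build_distance_tables hash_tables (build_distance_tables hash_tables)

-- ===== LEMMAS AND PROOFS =====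

-- A's inner defaultdict loop, as a dict, has exactly B's group-by as its items list
theorem pv_inner_items (hv : String) (keys : List String) :
    (keys.foldl (fun (d : PySem.Dict Int (List String)) other =>
        d.insert (pvHamming hv other) (d.getD (pvHamming hv other) [] ++ [other]))
      PySem.Dict.empty).items
    = (PySem.List.dedup (keys.map (pvHamming hv))).map (fun c =>
        (c, ((keys.zip (keys.map (pvHamming hv))).filter (fun p => p.2 == c)).map Prod.fst)) := by
  -- d.insert h (d.getD h [] ++ [o]) IS d.modify h [] (· ++ [o]); fold over the paired list instead
  have hfold :
      (keys.foldl (fun (d : PySem.Dict Int (List String)) other =>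
          d.insert (pvHamming hv other) (d.getD (pvHamming hv other) [] ++ [other]))
        PySem.Dict.empty)
      = ((keys.map (fun o => (pvHamming hv o, o))).foldl
          (fun (d : PySem.Dict Int (List String)) p => d.modify p.1 [] (· ++ [p.2]))
          PySem.Dict.empty) := by
    rw [List.foldl_map]
    rfl
  rw [hfold]
  have hnd : ((keys.map (fun o => (pvHamming hv o, o))).foldl
      (fun (d : PySem.Dict Int (List String)) p => d.modify p.1 [] (· ++ [p.2]))
      PySem.Dict.empty).keys.Nodup :=
    PySem.Dict.nodup_keys_foldl_modify_key _ Prod.fst [] (fun _ p => (· ++ [p.2])) _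
      PySem.Dict.nodup_keys_empty
  rw [PySem.Dict.items_eq_map_keys _ hnd []]
  rw [PySem.Dict.keys_foldl_modify_key _ Prod.fst [] (fun _ p => (· ++ [p.2]))]
  simp only [PySem.Dict.keys_empty, PySem.Set.update_nil_left, List.map_map]
  rw [PySem.List.dedup_eq_ofList]
  have hzip : keys.zip (keys.map (pvHamming hv)) = keys.map (fun o => (o, pvHamming hv o)) :=
    List.map_prod_left_eq_zip.symm
  apply List.map_congr_left
  intro c _
  rw [PySem.Dict.getD_foldl_modify_append, hzip]
  simp only [PySem.Dict.getD_empty, List.nil_append, List.filter_map, List.map_map]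
  rfl

-- A's per-table dict equals B's per-table list
theorem pv_table_items (keys : List String) (hnd : keys.Nodup) :
    ((keys.foldl (fun dt hash_value =>
        dt.insert hash_value
          (keys.foldl (fun (d : PySem.Dict Int (List String)) other =>
            d.insert (pvHamming hash_value other)
              (d.getD (pvHamming hash_value other) [] ++ [other])) PySem.Dict.empty))
      (PySem.Dict.empty : PySem.Dict String (PySem.Dict Int (List String)))).items.map
        (fun p => (p.1, p.2.items)))
    = keys.map (fun k =>
        (k, (PySem.List.dedup (keys.map (pvHamming k))).map (fun c =>
          (c, ((keys.zip (keys.map (pvHamming k))).filter (fun p => p.2 == c)).map Prod.fst)))) := by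
  rw [PySem.Dict.items_foldl_insert_fresh keys (fun a => a) _ PySem.Dict.empty
      (fun a _ => PySem.Dict.contains_empty a) (by simpa using hnd)]
  rw [show (PySem.Dict.empty : PySem.Dict String (PySem.Dict Int (List String))).items = [] from rfl,
    List.nil_append, List.map_map]
  apply List.map_congr_left
  intro k _
  simp only [Function.comp_apply]
  rw [pv_inner_items k keys]

-- ===== VERDICT =====
theorem build_distance_tables_spec : Claim_equal_build_distance_tables := by
  unfold Claim_equal_build_distance_tables
  intro ht _
  unfold Spec_build_distance_tables
  unfold build_distance_tables build_distance_tables_alt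
  rw [PySem.List.foldl_append_singleton_eq_map, List.nil_append]
  apply List.map_congr_left
  intro table _
  dsimp only
  exact pv_table_items (PySem.List.dedup (table.map Prod.fst))
    (by rw [PySem.List.dedup_eq_ofList]; exact PySem.Set.nodup_ofList _)
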